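-- pv_equiv track=rewrite | github.com/PranjalDby/DSA-Python | DynamicProgramming/minimum_swap_make_subsequence_incr.py | solve_min_helper
-- ===== SOURCE A (Python) =====
-- def solve_min_helper(nums1,nums2):
--
--     nums1.append(0)
--     for i in range(len(nums1)-1,-1,-1):
--         nums1[i] = nums1[i-1]
--
--     nums1[0] = -1
--     nums2.append(0)
--     for i in range(len(nums2)-1,-1,-1):
--         nums2[i] = nums2[i-1]
--
--     nums2[0] = -1
--
--     # for memoization
--
--     # dp = [[-1 for i in range(3)] for k in range(len(nums1)+1)]
--
--     return solve_min_swapSOPT(nums1,nums2)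
--
-- INT_MAX = 10 ** 9
--
-- def solve_min_swapSOPT(nums1,nums2):
--     # already handled the base case
--
--     swap = 0
--     noswap = 0
--     for index in range(len(nums1)-1,0,-1):
--         currentSwap = 0
--         current_noSwap = 0
--         for swapped in range(1,-1,-1):
--             ans = INT_MAX
--             prev1 = nums1[index-1]
--             prev2 = nums2[index-1]
--             if swapped == 1:
--                 temp = prev1
--                 prev1 = prev2
--                 prev2 = temp
--
--              # no swap
--             if nums1[index] > prev1 and nums2[index] > prev2:
--                 ans = noswap
--
--             # swap
--             if nums1[index] > prev2 and nums2[index] > prev1: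
--                 # 1 + to include the swapped way
--                 ans = min(ans,1 + swap)
--
--             if swapped:
--                 currentSwap = ans
--
--             else:
--                 current_noSwap = ans
--
--         # moving from last row to first row
--         swap = currentSwap
--         noswap = current_noSwap
--
--
--
--     return min(swap,noswap)
-- ===== SOURCE B (Python) =====
-- # Forward rolling DP over zipped consecutive pairs (A does a backward index loop
-- # with an inner 'swapped' loop).  Like A, mutates both argument lists in place,
-- # prepending a -1 sentinel.
-- INT_MAX = 10 ** 9
--
-- def solve_min_helper(nums1, nums2):
--     nums1.insert(0, -1)
--     nums2.insert(0, -1)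
--     keep = 0   # min swaps for the prefix, last position not swapped
--     swap = 0   # min swaps for the prefix, last position swapped (sentinel: free)
--     for p1, c1, p2, c2 in zip(nums1, nums1[1:], nums2, nums2[1:]):
--         new_keep = new_swap = INT_MAX
--         if c1 > p1 and c2 > p2:
--             new_keep = keep
--             new_swap = swap + 1
--         if c1 > p2 and c2 > p1:
--             new_keep = min(new_keep, swap)
--             new_swap = min(new_swap, keep + 1)
--         keep, swap = new_keep, new_swap
--     return min(keep, swap)
-- ===== Notes on version B (the rewrite author's own statement) =====
-- stated objective: faster
-- what changed: Replaced A's backward index loop with an inner two-iteration 'swapped' state loop and in-place shift-by-copy sentinel insertion by a single forward pass of a rolling (keep,swap) DP over zip-ped consecutive pairs; equality follows from associativity of the underlying min-plus path product with states capped at INT_MAX.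
-- outside the precondition, e.g. on solve_min_helper([5, 1], [7]): A returns 1000000000, B returns 0
import Mathlib
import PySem

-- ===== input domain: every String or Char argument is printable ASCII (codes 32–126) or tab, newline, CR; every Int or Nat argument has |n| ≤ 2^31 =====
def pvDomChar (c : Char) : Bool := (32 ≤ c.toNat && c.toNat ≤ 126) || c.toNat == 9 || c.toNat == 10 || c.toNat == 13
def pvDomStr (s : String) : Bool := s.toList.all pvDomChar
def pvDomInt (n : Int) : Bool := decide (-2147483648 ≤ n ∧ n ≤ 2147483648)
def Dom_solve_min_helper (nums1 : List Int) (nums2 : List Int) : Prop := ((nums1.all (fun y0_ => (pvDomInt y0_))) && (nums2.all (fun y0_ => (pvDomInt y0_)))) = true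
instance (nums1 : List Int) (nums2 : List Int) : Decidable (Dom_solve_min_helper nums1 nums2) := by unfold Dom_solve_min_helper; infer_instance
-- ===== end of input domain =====

-- B replaces A's backward index-loop DP (with an inner two-pass "swapped" loop) by a single
-- forward rolling (keep, swap) DP over zipped consecutive pairs; same return value, and the same
-- in-place mutation of both argument lists (a -1 sentinel is prepended to each).


-- ===== PORT A =====

def INT_MAX : Int := 10 ^ 9

-- the in-place shift loop 'xs.append(0); for i in range(len(xs)-1,-1,-1): xs[i] = xs[i-1]'
-- (reading xs[-1] at i = 0 is Python's negative-index access, hence pyGetD with index i-1)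
def pvShiftLoop (l : List Int) : List Int :=
  (PySem.List.pyRange ((l.length : Int) - 1) (-1) (-1)).foldl
    (fun acc i => PySem.List.pySetD acc i (PySem.List.pyGetD acc (i - 1) 0)) l

-- one iteration of A's outer loop: the inner loop 'for swapped in range(1,-1,-1)' updating
-- (currentSwap, current_noSwap); st = (swap, noswap) from the previous iteration
def pvAInner (nums1 : List Int) (nums2 : List Int) (st : Int × Int) (index : Int) : Int × Int :=
  (PySem.List.pyRange 1 (-1) (-1)).foldl
    (fun (cur : Int × Int) swapped =>
      let ans : Int := INT_MAX
      let prev1 := PySem.List.pyGetD nums1 (index - 1) 0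
      let prev2 := PySem.List.pyGetD nums2 (index - 1) 0
      let prev1' := if swapped = 1 then prev2 else prev1
      let prev2' := if swapped = 1 then prev1 else prev2
      let ans := if PySem.List.pyGetD nums1 index 0 > prev1' ∧
                    PySem.List.pyGetD nums2 index 0 > prev2' then st.2 else ans
      let ans := if PySem.List.pyGetD nums1 index 0 > prev2' ∧
                    PySem.List.pyGetD nums2 index 0 > prev1' then min ans (1 + st.1) else ans
      if swapped ≠ 0 then (ans, cur.2) else (cur.1, ans))
    (0, 0)

def solve_min_swapSOPT (nums1 : List Int) (nums2 : List Int) : Int :=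
  let res : Int × Int :=                           -- res = (swap, noswap)
    (PySem.List.pyRange ((nums1.length : Int) - 1) 0 (-1)).foldl (pvAInner nums1 nums2) (0, 0)
  min res.1 res.2

def solve_min_helper (nums1 : List Int) (nums2 : List Int) : Int :=
  let n1 := PySem.List.pySetD (pvShiftLoop (nums1 ++ [0])) 0 (-1)
  let n2 := PySem.List.pySetD (pvShiftLoop (nums2 ++ [0])) 0 (-1)
  solve_min_swapSOPT n1 n2

-- ===== PORT B =====

-- B's own module constant (Source B re-declares INT_MAX = 10 ** 9)
def pvIntMaxB : Int := 10 ^ 9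

-- one forward step of the rolling DP; q = (p1, (c1, (p2, c2))), st = (keep, swap)
def pvFwdStep (st : Int × Int) (q : Int × Int × Int × Int) : Int × Int :=
  let p1 := q.1; let c1 := q.2.1; let p2 := q.2.2.1; let c2 := q.2.2.2
  let nk : Int := pvIntMaxB
  let ns : Int := pvIntMaxB
  let nk := if c1 > p1 ∧ c2 > p2 then st.1 else nk
  let ns := if c1 > p1 ∧ c2 > p2 then st.2 + 1 else ns
  let nk := if c1 > p2 ∧ c2 > p1 then min nk st.2 else nk
  let ns := if c1 > p2 ∧ c2 > p1 then min ns (st.1 + 1) else ns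
  (nk, ns)

def solve_min_helper_alt (nums1 : List Int) (nums2 : List Int) : Int :=
  let l1 := PySem.List.insert nums1 0 (-1)
  let l2 := PySem.List.insert nums2 0 (-1)
  let quads := List.zip l1 (List.zip (PySem.List.slice l1 (some 1) none)
                 (List.zip l2 (PySem.List.slice l2 (some 1) none)))
  let st := quads.foldl pvFwdStep (0, 0)
  min st.1 st.2

-- ===== PRECONDITION & SPEC =====
-- Pre_ excludes inputs with nums2 shorter than nums1: there A's DP loop indexes past the end of
-- nums2 and raises IndexError, except when short-circuit evaluation skips the access, in which
-- case A's returned value is an accident of the partial scan (B returns the DP value over the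
-- zip-truncated pairs there).
def Pre_solve_min_helper (nums1 : List Int) (nums2 : List Int) : Prop :=
  nums1.length ≤ nums2.length
instance (nums1 : List Int) (nums2 : List Int) : Decidable (Pre_solve_min_helper nums1 nums2) := by
  unfold Pre_solve_min_helper; infer_instance

def pvWitness_solve_min_helper : List Int × List Int := ([1, 3, 5, 4], [1, 2, 3, 7])

def Spec_solve_min_helper (nums1 : List Int) (nums2 : List Int) (out : Int) : Prop := out = solve_min_helper_alt nums1 nums2
instance (nums1 : List Int) (nums2 : List Int) (out : Int) : Decidable (Spec_solve_min_helper nums1 nums2 out) := by unfold Spec_solve_min_helper; infer_instance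

-- ===== CLAIM (what is proved, stated in full; the proofs are below) =====
def Claim_equal_solve_min_helper : Prop := ∀ (nums1 : List Int) (nums2 : List Int), Dom_solve_min_helper nums1 nums2 → Pre_solve_min_helper nums1 nums2 → Spec_solve_min_helper nums1 nums2 (solve_min_helper nums1 nums2)

-- ===== LEMMAS AND PROOFS =====

-- ## The exact (uncapped) DP over WithTop ℕ, where the forward/backward exchange is clean
-- ## min-plus algebra; the ports compute its INT_MAX-capped image.

-- backward step: state (v0, v1) indexed by the swap flag of the PREVIOUS position
def pvBStep (q : Int × Int × Int × Int) (v : WithTop ℕ × WithTop ℕ) : WithTop ℕ × WithTop ℕ :=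
  (min (if q.2.1 > q.1 ∧ q.2.2.2 > q.2.2.1 then v.1 else ⊤)
       (if q.2.1 > q.2.2.1 ∧ q.2.2.2 > q.1 then 1 + v.2 else ⊤),
   min (if q.2.1 > q.2.2.1 ∧ q.2.2.2 > q.1 then v.1 else ⊤)
       (if q.2.1 > q.1 ∧ q.2.2.2 > q.2.2.1 then 1 + v.2 else ⊤))

-- forward step: state (u0, u1) indexed by the swap flag of the CURRENT position
def pvFStep (u : WithTop ℕ × WithTop ℕ) (q : Int × Int × Int × Int) : WithTop ℕ × WithTop ℕ :=
  (min (if q.2.1 > q.1 ∧ q.2.2.2 > q.2.2.1 then u.1 else ⊤)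
       (if q.2.1 > q.2.2.1 ∧ q.2.2.2 > q.1 then u.2 else ⊤),
   min (if q.2.1 > q.2.2.1 ∧ q.2.2.2 > q.1 then u.1 + 1 else ⊤)
       (if q.2.1 > q.1 ∧ q.2.2.2 > q.2.2.1 then u.2 + 1 else ⊤))

def pvCap : WithTop ℕ → Int
  | ⊤ => INT_MAX
  | (k : ℕ) => min (k : Int) INT_MAX

def pvComb (u v : WithTop ℕ × WithTop ℕ) : WithTop ℕ := min (u.1 + v.1) (u.2 + v.2)

-- the backward Int step that A's loop body computes (proved below at the loop level)
def pvBStepInt (q : Int × Int × Int × Int) (st : Int × Int) : Int × Int :=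
  -- st = (swap, noswap), result = (currentSwap, current_noSwap)
  (let ans := if q.2.1 > q.2.2.1 ∧ q.2.2.2 > q.1 then st.2 else INT_MAX
   if q.2.1 > q.1 ∧ q.2.2.2 > q.2.2.1 then min ans (1 + st.1) else ans,
   let ans := if q.2.1 > q.1 ∧ q.2.2.2 > q.2.2.1 then st.2 else INT_MAX
   if q.2.1 > q.2.2.1 ∧ q.2.2.2 > q.1 then min ans (1 + st.1) else ans)

-- quads of consecutive pairs (the zip B builds)
def pvQuads (l1 l2 : List Int) : List (Int × Int × Int × Int) :=
  List.zip l1 (List.zip l1.tail (List.zip l2 l2.tail))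

-- B's capped forward state (keep, swap) vs the exact forward state: keep is the exact cap,
-- swap agrees with the exact cap up to values above INT_MAX (which a later min always discards)
def pvRelF (st : Int × Int) (u : WithTop ℕ × WithTop ℕ) : Prop :=
  st.1 = pvCap u.1 ∧ min st.2 INT_MAX = pvCap u.2

theorem pvCap_le (x : WithTop ℕ) : pvCap x ≤ INT_MAX := by
  cases x with
  | top => simp [pvCap]
  | coe k => simp [pvCap]

theorem pvCap_min (a b : WithTop ℕ) : pvCap (min a b) = min (pvCap a) (pvCap b) := by
  cases a with
  | top => cases b with
    | top => simp [pvCap]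
    | coe k => simp [pvCap]
  | coe j => cases b with
    | top => simp [pvCap]
    | coe k =>
      rcases le_total j k with h | h
      · rw [min_eq_left (by exact_mod_cast h)]
        simp [pvCap]; omega
      · rw [min_eq_right (by exact_mod_cast h)]
        simp [pvCap]; omega

theorem pvCap_one_add (a : Int) (x : WithTop ℕ) (ha : a ≤ INT_MAX) :
    min a (1 + pvCap x) = min a (pvCap (1 + x)) := by
  cases x with
  | top =>
    rw [show (1 : WithTop ℕ) + ⊤ = ⊤ from rfl]
    simp [pvCap, INT_MAX] at *
    omega
  | coe k =>
    rw [show (1 : WithTop ℕ) + (WithTop.some k) = WithTop.some (1 + k) from rfl]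
    simp [pvCap, INT_MAX] at *
    omega

theorem pvCap_add_one (x : WithTop ℕ) : pvCap (x + 1) = min (pvCap x + 1) INT_MAX := by
  cases x with
  | top =>
    rw [show (⊤ : WithTop ℕ) + 1 = ⊤ from rfl]
    simp [pvCap, INT_MAX]
  | coe k =>
    rw [show (WithTop.some k : WithTop ℕ) + 1 = WithTop.some (k + 1) from rfl]
    simp [pvCap, INT_MAX]
    omega

theorem pvExchange (q : Int × Int × Int × Int) (u v : WithTop ℕ × WithTop ℕ) :
    pvComb u (pvBStep q v) = pvComb (pvFStep u q) v := by
  obtain ⟨p1, c1, p2, c2⟩ := q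
  obtain ⟨u1, u2⟩ := u
  obtain ⟨v1, v2⟩ := v
  unfold pvComb pvBStep pvFStep
  by_cases hs : c1 > p1 ∧ c2 > p2 <;> by_cases hd : c1 > p2 ∧ c2 > p1
  · simp only [if_pos hs, if_pos hd]
    simp only [← min_add_add_left, ← min_add_add_right]
    simp [min_assoc, min_comm, min_left_comm, add_comm, add_left_comm]
  · simp [hs, hd, add_comm, add_left_comm]
  · simp [hs, hd, min_comm, add_comm, add_left_comm]
  · simp [hs, hd]

theorem pvComb_foldr (qs : List (Int × Int × Int × Int)) (u : WithTop ℕ × WithTop ℕ) :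
    pvComb u (qs.foldr pvBStep (0, 0)) = pvComb (qs.foldl pvFStep u) (0, 0) := by
  induction qs generalizing u with
  | nil => rfl
  | cons q qs ih => rw [List.foldr_cons, pvExchange, List.foldl_cons, ih]

-- capped backward step = cap of exact backward step
theorem pvBStepInt_cap (q : Int × Int × Int × Int) (v : WithTop ℕ × WithTop ℕ) :
    pvBStepInt q (pvCap v.2, pvCap v.1) = (pvCap (pvBStep q v).2, pvCap (pvBStep q v).1) := by
  obtain ⟨p1, c1, p2, c2⟩ := q
  obtain ⟨v1, v2⟩ := v
  have h1 := pvCap_le v1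
  unfold pvBStepInt pvBStep
  by_cases hs : c1 > p1 ∧ c2 > p2 <;> by_cases hd : c1 > p2 ∧ c2 > p1 <;>
    simp only [hs, hd, not_false_iff] <;>
    simp [pvCap_min, ← pvCap_one_add _ _ h1, min_eq_right (pvCap_le _)] <;>
    first
      | rfl
      | (rw [pvCap_one_add INT_MAX _ le_rfl]; exact min_eq_right (pvCap_le _))

-- B's forward step preserves the cap relation
theorem pvFwdStep_rel (st : Int × Int) (u : WithTop ℕ × WithTop ℕ) (q : Int × Int × Int × Int)
    (h : pvRelF st u) : pvRelF (pvFwdStep st q) (pvFStep u q) := by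
  obtain ⟨p1, c1, p2, c2⟩ := q
  obtain ⟨k, s⟩ := st
  obtain ⟨K, S⟩ := u
  obtain ⟨h1, h2⟩ := h
  simp only [pvRelF] at *
  have hK := pvCap_le K
  have hS := pvCap_le S
  have hK1 := pvCap_add_one K
  have hS1 := pvCap_add_one S
  unfold pvFwdStep pvFStep
  by_cases hs : c1 > p1 ∧ c2 > p2 <;> by_cases hd : c1 > p2 ∧ c2 > p1 <;>
    simp only [hs, hd, not_false_iff] <;>
    constructor <;>
    simp only [pvCap_min] <;>
    simp [pvCap, INT_MAX, pvIntMaxB] at * <;>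
    omega

theorem pvBFold_cap (qs : List (Int × Int × Int × Int)) :
    qs.foldr pvBStepInt (0, 0) =
      (pvCap (qs.foldr pvBStep ((0 : WithTop ℕ), (0 : WithTop ℕ))).2,
       pvCap (qs.foldr pvBStep ((0 : WithTop ℕ), (0 : WithTop ℕ))).1) := by
  induction qs with
  | nil => rfl
  | cons q qs ih =>
    rw [List.foldr_cons, List.foldr_cons, ih,
      pvBStepInt_cap q (qs.foldr pvBStep ((0 : WithTop ℕ), (0 : WithTop ℕ)))]

theorem pvFFold_rel (qs : List (Int × Int × Int × Int)) (st : Int × Int)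
    (u : WithTop ℕ × WithTop ℕ) (h : pvRelF st u) :
    pvRelF (qs.foldl pvFwdStep st) (qs.foldl pvFStep u) := by
  induction qs generalizing st u with
  | nil => exact h
  | cons q qs ih => exact ih _ _ (pvFwdStep_rel st u q h)

theorem pvGetD_cons (x : Int) (l : List Int) (i d : Int) (h : 1 ≤ i) :
    PySem.List.pyGetD (x :: l) i d = PySem.List.pyGetD l (i - 1) d := by
  rw [PySem.List.pyGetD_of_nonneg (x :: l) d (by omega),
    PySem.List.pyGetD_of_nonneg l d (by omega)]
  have : i.toNat = (i - 1).toNat + 1 := by omega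
  rw [this]
  rfl

-- A's loop body, with its inner two-iteration loop unrolled, is pvBStepInt on the i-th quad
theorem pvAInner_eq (l1 l2 : List Int) (st : Int × Int) (i : Int) :
    pvAInner l1 l2 st i =
      pvBStepInt (PySem.List.pyGetD l1 (i - 1) 0, PySem.List.pyGetD l1 i 0,
                  PySem.List.pyGetD l2 (i - 1) 0, PySem.List.pyGetD l2 i 0) st := by
  unfold pvAInner pvBStepInt
  rw [show PySem.List.pyRange 1 (-1) (-1) = [1, 0] from by decide]
  norm_num [List.foldl]

-- shifting both lists shifts the index window of A's loop body
theorem pvAShift (x y : Int) (l1 l2 : List Int) (s : Int × Int) :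
    ∀ (n : Nat) (a b : Int), 1 ≤ a → n = (b - a).toNat →
    (PySem.List.pyRange (a + 1) (b + 1) 1).foldr (fun i st => pvAInner (x :: l1) (y :: l2) st i) s
      = (PySem.List.pyRange a b 1).foldr (fun i st => pvAInner l1 l2 st i) s := by
  intro n
  induction n with
  | zero =>
    intro a b ha hn
    rw [PySem.List.pyRange_one_eq_nil (by omega), PySem.List.pyRange_one_eq_nil (by omega)]
    rfl
  | succ n ih =>
    intro a b ha hn
    by_cases hab : a < b
    · rw [PySem.List.pyRange_one_cons (by omega), PySem.List.pyRange_one_cons hab,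
        List.foldr_cons, List.foldr_cons, ih (a + 1) b (by omega) (by omega)]
      rw [pvAInner_eq, pvAInner_eq]
      rw [pvGetD_cons x l1 (a + 1) 0 (by omega), pvGetD_cons x l1 (a + 1 - 1) 0 (by omega),
        pvGetD_cons y l2 (a + 1) 0 (by omega), pvGetD_cons y l2 (a + 1 - 1) 0 (by omega)]
      norm_num
    · rw [PySem.List.pyRange_one_eq_nil (by omega), PySem.List.pyRange_one_eq_nil (by omega)]
      rfl

theorem pvQuads_cons (a b c d : Int) (r t : List Int) :
    pvQuads (a :: b :: r) (c :: d :: t) = (a, b, c, d) :: pvQuads (b :: r) (d :: t) := rfl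

-- the descending index loop of A, read right-to-left, is the backward fold over the quads
theorem pvALoopFoldr (l1 : List Int) : ∀ (l2 : List Int) (s : Int × Int),
    l1.length ≤ l2.length →
    (PySem.List.pyRange 1 (l1.length : Int) 1).foldr (fun i st => pvAInner l1 l2 st i) s
      = (pvQuads l1 l2).foldr pvBStepInt s := by
  induction l1 with
  | nil => intro l2 s _; rw [PySem.List.pyRange_one_eq_nil (by simp)]; rfl
  | cons a t ih =>
    intro l2 s h
    match t, l2, h with
    | [], _, _ => rw [PySem.List.pyRange_one_eq_nil (by simp)]; rfl
    | b :: r, [], h => simp at h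
    | b :: r, [c], h => simp at h
    | b :: r, c :: d :: t2, h =>
      have hlen : ((a :: b :: r).length : Int) = ((b :: r).length : Int) + 1 := by
        push_cast [List.length_cons]; ring
      rw [PySem.List.pyRange_one_cons (by push_cast [List.length_cons]; omega), List.foldr_cons]
      rw [hlen, pvAShift a c (b :: r) (d :: t2) s ((((b :: r).length : Int) - 1).toNat) 1
            ((b :: r).length : Int) le_rfl (by omega)]
      rw [ih (d :: t2) s (by simpa using h)]
      rw [pvAInner_eq]
      rw [pvQuads_cons, List.foldr_cons]
      norm_num [PySem.List.pyGetD_zero_cons]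
      rw [pvGetD_cons a (b :: r) 1 0 le_rfl, pvGetD_cons c (d :: t2) 1 0 le_rfl]
      norm_num [PySem.List.pyGetD_zero_cons]

-- A's DP loop is the backward fold over the quads
theorem pvALoop_spec (l1 l2 : List Int) (h : l1.length ≤ l2.length) :
    solve_min_swapSOPT l1 l2 =
      min ((pvQuads l1 l2).foldr pvBStepInt (0, 0)).1 ((pvQuads l1 l2).foldr pvBStepInt (0, 0)).2 := by
  unfold solve_min_swapSOPT
  rw [PySem.List.pyRange_neg_one_eq_reverse, List.foldl_reverse]
  rw [show (0 : Int) + 1 = 1 from rfl, show ((l1.length : Int) - 1) + 1 = (l1.length : Int) from by ring]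
  rw [pvALoopFoldr l1 l2 (0, 0) h]

-- invariant of the (right-to-left read) shift loop: below k untouched, from k on shifted by one
theorem pvShiftInv (l : List Int) : ∀ (n k : Nat), 1 ≤ k → k ≤ l.length → n = l.length - k →
    (PySem.List.pyRange (k : Int) (l.length : Int) 1).foldr
        (fun i acc => PySem.List.pySetD acc i (PySem.List.pyGetD acc (i - 1) 0)) l
      = l.take k ++ (l.drop (k - 1)).take (l.length - k) := by
  intro n
  induction n with
  | zero =>
    intro k h1 h2 hn
    have hk : k = l.length := by omega
    rw [PySem.List.pyRange_one_eq_nil (by omega)]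
    simp [hk]
  | succ n ih =>
    intro k h1 h2 hn
    have hklt : k < l.length := by omega
    rw [PySem.List.pyRange_one_cons (by exact_mod_cast hklt), List.foldr_cons,
      show ((k : Int) + 1) = ((k + 1 : Nat) : Int) from by push_cast; ring,
      ih (k + 1) (by omega) (by omega) (by omega)]
    rw [show ((k : Int) - 1) = ((k - 1 : Nat) : Int) from by omega]
    rw [PySem.List.pyGetD_of_nonneg _ 0 (by omega), PySem.List.pySetD_of_nonneg _ _ (by omega)]
    simp only [Int.toNat_natCast]
    have hk1 : k - 1 < (l.take (k + 1)).length := by simp; omega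
    have hgd : (l.take (k + 1) ++ (l.drop (k + 1 - 1)).take (l.length - (k + 1))).getD (k - 1) 0
        = l[k - 1]'(by omega) := by
      rw [List.getD_eq_getElem _ _ (by simp; omega), List.getElem_append_left hk1,
        List.getElem_take]
    rw [hgd]
    rw [List.set_append, if_pos (show k < (l.take (k + 1)).length by simp; omega)]
    have htk : l.take (k + 1) = l.take k ++ [l[k]'hklt] := by
      rw [List.take_add_one, List.getElem?_eq_getElem hklt]; rfl
    rw [htk, List.set_append, if_neg (show ¬ k < (l.take k).length by simp)]
    have h0 : k - (l.take k).length = 0 := by simp; omega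
    rw [h0, List.set_cons_zero]
    have hdrop : l.drop (k - 1) = l[k - 1]'(by omega) :: l.drop k := by
      rw [List.drop_eq_getElem_cons (show k - 1 < l.length by omega),
        show k - 1 + 1 = k from by omega]
    rw [hdrop]
    have hLk : l.length - k = (l.length - (k + 1)) + 1 := by omega
    rw [hLk, List.take_succ_cons]
    simp [List.append_assoc]

-- the mutation prologue of A builds -1 :: xs
theorem pvShift_spec (xs : List Int) :
    PySem.List.pySetD (pvShiftLoop (xs ++ [0])) 0 (-1) = -1 :: xs := by
  cases xs with
  | nil => decide
  | cons a t =>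
    unfold pvShiftLoop
    rw [PySem.List.pyRange_neg_one_eq_reverse, List.foldl_reverse]
    have h0 : (-1 : Int) + 1 = 0 := rfl
    have h1 : (((a :: t ++ [0]).length : Int) - 1) + 1 = ((a :: t ++ [0]).length : Int) := by ring
    rw [h0, h1]
    rw [PySem.List.pyRange_one_cons (by simp; omega), List.foldr_cons,
      show (0 : Int) + 1 = ((1 : Nat) : Int) from rfl]
    rw [pvShiftInv (a :: t ++ [0]) ((a :: t ++ [0]).length - 1) 1 le_rfl (by simp) rfl]
    rw [PySem.List.pySetD_of_nonneg _ _ (by norm_num), PySem.List.pySetD_of_nonneg _ _ (by norm_num)]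
    rw [show ((0 : Int)).toNat = 0 from rfl, List.set_set]
    have hS : (a :: t ++ [0]).take 1 ++
        (((a :: t ++ [0]).drop (1 - 1)).take ((a :: t ++ [0]).length - 1)) = a :: (a :: t) := by
      simp [List.take_left']
    rw [hS, List.set_cons_zero]

-- B's port is the forward fold over the quads
theorem pvBPort_spec (nums1 nums2 : List Int) :
    solve_min_helper_alt nums1 nums2 =
      min ((pvQuads (-1 :: nums1) (-1 :: nums2)).foldl pvFwdStep (0, 0)).1
          ((pvQuads (-1 :: nums1) (-1 :: nums2)).foldl pvFwdStep (0, 0)).2 := by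
  simp only [solve_min_helper_alt, pvQuads, PySem.List.insert_zero, PySem.List.slice_from_one]

-- ===== VERDICT (by name: the statement is the Claim_ definition above) =====
theorem solve_min_helper_spec : Claim_equal_solve_min_helper := by
  intro nums1 nums2 _hdom hpre
  unfold Spec_solve_min_helper
  unfold Pre_solve_min_helper at hpre
  -- A's side
  show solve_min_helper nums1 nums2 = _
  unfold solve_min_helper
  rw [pvShift_spec, pvShift_spec]
  rw [pvALoop_spec (-1 :: nums1) (-1 :: nums2) (by simpa using hpre)]
  rw [pvBPort_spec]
  set qs := pvQuads (-1 :: nums1) (-1 :: nums2) with hqs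
  -- backward side is the cap of the exact backward fold
  rw [pvBFold_cap]
  -- forward side via the relation
  have hrel : pvRelF (qs.foldl pvFwdStep (0, 0)) (qs.foldl pvFStep ((0 : WithTop ℕ), (0 : WithTop ℕ))) := by
    apply pvFFold_rel
    constructor <;> simp [pvCap, INT_MAX]
  -- exact sides agree by the exchange law
  have hex : min (qs.foldr pvBStep ((0 : WithTop ℕ), (0 : WithTop ℕ))).1
                 (qs.foldr pvBStep ((0 : WithTop ℕ), (0 : WithTop ℕ))).2
           = min (qs.foldl pvFStep ((0 : WithTop ℕ), (0 : WithTop ℕ))).1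
                 (qs.foldl pvFStep ((0 : WithTop ℕ), (0 : WithTop ℕ))).2 := by
    have := pvComb_foldr qs ((0 : WithTop ℕ), (0 : WithTop ℕ))
    simpa [pvComb] using this
  obtain ⟨h1, h2⟩ := hrel
  have hF1 := pvCap_le (qs.foldl pvFStep ((0 : WithTop ℕ), (0 : WithTop ℕ))).1
  have hB := congrArg pvCap hex
  rw [pvCap_min, pvCap_min] at hB
  rw [min_comm] at hB
  rw [hB, ← h1, ← h2]
  have hk : (qs.foldl pvFwdStep ((0 : Int), (0 : Int))).1 ≤ INT_MAX := by rw [h1]; exact hF1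
  omega
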